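-- pv_equiv track=rewrite | github.com/StudyForCoding/ProgrammersLevel | Level2/Lessons72412/wowo0709.py | solution
-- ===== SOURCE A (Python) =====
-- def solution(infos, querys):
--     # 조건 해쉬맵 생성
--     from itertools import combinations
--     info_dict = dict()
--     for info in infos:
--         conds = info.split()
--         for n in range(5):                            # "-" 를 0~4개 삽입 가능
--             idx_list = list(combinations(range(4),n)) # "-"를 삽입하는 위치에 대한 콤비네이션
--             for idxs in idx_list:      # 각 위치(인덱스 리스트)에 대해
--                 tmp = conds[:4].copy() # 조건(점수 제외) 복사
--                 for idx in idxs:   # 각 인덱스에 대해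
--                     tmp[idx] = "-" # 인덱스에 "-" 삽입
--                 info_dict_key = "_".join(tmp)
--                 '''dict.get() 쓰면 시간 2배 이상 걸림'''
--                 # info_dict[info_dict_key] = info_dict.get(info_dict_key,[]) + [int(conds[4])]
--                 if info_dict_key in info_dict: info_dict[info_dict_key].append(int(conds[4]))
--                 else: info_dict[info_dict_key] = [int(conds[4])]
--     '''먼저 정렬하지 않고 탐색 시마다 정렬하면 시간 초과'''
--     # 점수 정렬 -> 이진 탐색 알고리즘
--     for values in info_dict.values():
--         values.sort()
--
--     # 조건 비교
--     from bisect import bisect_left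
--     ans = []
--     for query in querys:
--         query = [q for q in query.split() if q != "and"]
--         info_dict_key = "_".join(query[:4])
--         if info_dict_key in info_dict: # 조건을 만족하는 후보에 한해 커트라인 점수를 적용
--             candidates = info_dict[info_dict_key]
--             cnt = len(candidates) - bisect_left(candidates,int(query[4]))
--         else:                          # 조건을 만족하는 후보가 없음
--             cnt = 0
--         ans.append(cnt)
--
--     return ans
-- ===== SOURCE B (Python) =====
-- def solution(infos, querys):
--     # simpler: parse each info once, then a direct per-query scan; no wildcard-key index, no sorting, no binary search
--     data = []
--     for info in infos:
--         a = info.split()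
--         data.append((a[:4], int(a[4])))
--
--     def matches(t, attrs):
--         return len(t) >= 4 and all(q == "-" or q == v for q, v in zip(t[:4], attrs))
--
--     answer = []
--     for query in querys:
--         tokens = [w for w in query.split() if w != "and"]
--         cnt = 0
--         for attrs, score in data:
--             if matches(tokens, attrs) and score >= int(tokens[4]):
--                 cnt += 1
--         answer.append(cnt)
--     return answer
-- ===== Notes on version B (the rewrite author's own statement) =====
-- stated objective: simpler
-- what changed: B drops A's precomputed hash map of all 16 wildcard-masked keys per info and its per-key sort plus binary search: it parses each info once into its 4 attributes and int score, then for every query directly scans that list, counting entries whose attributes each equal the query token (or the token is '-') and whose score reaches the cutoff; Pre_ excludes infos whose attribute tokens contain '_' or equal '-' (A's '_'-joined keys collide or double-count there, an artefact of the key encoding).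
-- outside the precondition, e.g. on solution(['a_b c d e 5'], ['a and b_c and d and - 0']): A returns [1], B returns [0]; on solution(['- a b c 10'], ['- and a and b and c 5']): A returns [2], B returns [1]
import Mathlib
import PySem

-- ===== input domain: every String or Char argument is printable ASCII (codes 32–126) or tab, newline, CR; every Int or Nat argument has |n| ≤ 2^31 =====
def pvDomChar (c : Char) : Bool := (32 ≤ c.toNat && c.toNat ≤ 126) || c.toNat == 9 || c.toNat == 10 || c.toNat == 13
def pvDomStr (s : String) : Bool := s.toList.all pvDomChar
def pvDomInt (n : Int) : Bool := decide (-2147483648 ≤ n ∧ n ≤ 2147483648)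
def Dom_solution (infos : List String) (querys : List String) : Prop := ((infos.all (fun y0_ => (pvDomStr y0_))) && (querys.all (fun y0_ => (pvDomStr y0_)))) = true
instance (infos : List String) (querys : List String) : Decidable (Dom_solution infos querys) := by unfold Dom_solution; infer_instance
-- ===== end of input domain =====

-- B replaces A's precomputed hash map of wildcard-masked keys plus per-key sort and binary search by a
-- direct per-query scan that counts the matching infos (simpler, not faster).

-- ===== PORT A =====
def solution (infos : List String) (querys : List String) : List Int :=
  let info_dict : PySem.Dict String (List Int) :=
    infos.foldl (fun info_dict info =>
      let conds := PySem.Str.split₀ info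
      (PySem.List.pyRange 0 5 1).foldl (fun info_dict n =>
        let idx_list := PySem.List.combinations (PySem.List.pyRange 0 4 1) n.toNat
        idx_list.foldl (fun info_dict idxs =>
          let tmp := idxs.foldl (fun tmp idx => PySem.List.pySetD tmp idx "-")
                       (PySem.List.slice conds none (some 4))
          let info_dict_key := PySem.Str.join "_" tmp
          let score := (PySem.Int.ofStr? (PySem.List.pyGetD conds 4 "")).getD 0
          if info_dict.contains info_dict_key then
            info_dict.modify info_dict_key [] (fun l => l ++ [score])
          else info_dict.insert info_dict_key [score]) info_dict) info_dict)
      PySem.Dict.empty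
  -- 'for values in info_dict.values(): values.sort()' — each value list sorted in place
  let info_dict := PySem.Dict.mk (info_dict.items.map (fun p => (p.1, PySem.List.sorted p.2 (fun x => x) false)))
  querys.foldl (fun ans query =>
    let q := (PySem.Str.split₀ query).filter (fun t => t != "and")
    let info_dict_key := PySem.Str.join "_" (PySem.List.slice q none (some 4))
    let cnt : Int :=
      if info_dict.contains info_dict_key then
        PySem.List.len (info_dict.getD info_dict_key []) -
          (PySem.List.bisectLeft (info_dict.getD info_dict_key [])
            ((PySem.Int.ofStr? (PySem.List.pyGetD q 4 "")).getD 0) : Int)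
      else 0
    ans ++ [cnt]) []

-- ===== PORT B =====
-- matches(t, attrs): the query has its 4 condition tokens and each is "-" or equals the attribute
def matchesB (tq : List String) (attrs : List String) : Bool :=
  decide ((4 : Int) ≤ PySem.List.len tq) &&
    ((PySem.List.slice tq none (some 4)).zip attrs).all
      (fun p => p.1 == "-" || p.1 == p.2)

def solution_alt (infos : List String) (querys : List String) : List Int :=
  -- parse each info once: its 4 attributes and its int score
  let data : List (List String × Int) := infos.foldl (fun data info =>
    let a := PySem.Str.split₀ info
    data ++ [(PySem.List.slice a none (some 4),
              (PySem.Int.ofStr? (PySem.List.pyGetD a 4 "")).getD 0)]) []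
  querys.foldl (fun answer query =>
    let tokens := (PySem.Str.split₀ query).filter (fun t => t != "and")
    let cnt : Int := data.foldl (fun cnt p =>
      if matchesB tokens p.1 &&
          ((PySem.Int.ofStr? (PySem.List.pyGetD tokens 4 "")).getD 0 ≤ p.2)
      then cnt + 1 else cnt) 0
    answer ++ [cnt]) []

-- ===== PRECONDITION & SPEC =====
-- split on '_' (Python's "s".split("_")), used to state when a query key can hit A's dictionary
def splitU (cs : List Char) : List (List Char) :=
  match cs with
  | [] => [[]]
  | c :: rest =>
    let r := splitU rest
    if c = '_' then [] :: r else (c :: r.headD []) :: r.tail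

def splitUS (str : String) : List String := (splitU str.toList).map (fun cs => String.ofList cs)

-- the per-token wildcard match of one info line against four query tokens
def mtch (q0 q1 q2 q3 : String) (info : String) : Bool :=
  (q0 == "-" || q0 == (PySem.Str.split₀ info).getD 0 "") &&
  ((q1 == "-" || q1 == (PySem.Str.split₀ info).getD 1 "") &&
  ((q2 == "-" || q2 == (PySem.Str.split₀ info).getD 2 "") &&
   (q3 == "-" || q3 == (PySem.Str.split₀ info).getD 3 "")))

-- whether the "_"-joined key K of a query hits the masked key of some info
def keyHit (infos : List String) (K : String) : Prop :=
  (splitUS K).length = 4 ∧ ∃ info ∈ infos, mtch ((splitUS K).getD 0 "") ((splitUS K).getD 1 "")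
    ((splitUS K).getD 2 "") ((splitUS K).getD 3 "") info = true

-- Pre_ restricts to the problem's natural domain: every info splits into 4 attribute tokens, none of which
-- is "-" or contains '_' (A's "_"-joined dictionary keys treat such values accidentally), plus an int
-- score; a query (after dropping "and") must either have 4 condition tokens plus an int cutoff, or be one
-- whose "_"-joined key hits no info (then A answers 0 without parsing the rest of the query).
def Pre_solution (infos : List String) (querys : List String) : Prop :=
  (∀ info ∈ infos, 5 ≤ (PySem.Str.split₀ info).length ∧
      (∀ t ∈ (PySem.Str.split₀ info).take 4, ¬ '_' ∈ t.toList ∧ t ≠ "-") ∧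
      (PySem.Int.ofStr? ((PySem.Str.split₀ info).getD 4 "")).isSome = true) ∧
  (∀ query ∈ querys,
      (5 ≤ ((PySem.Str.split₀ query).filter (fun t => t != "and")).length ∧
        (PySem.Int.ofStr? (((PySem.Str.split₀ query).filter (fun t => t != "and")).getD 4 "")).isSome = true) ∨
      ¬ keyHit infos (PySem.Str.join "_"
          (((PySem.Str.split₀ query).filter (fun t => t != "and")).take 4)))
instance (infos : List String) (querys : List String) : Decidable (Pre_solution infos querys) := by
  unfold Pre_solution keyHit; infer_instance

def pvWitness_solution : List String × List String :=
  (["java backend junior pizza 150", "python frontend senior chicken 210"],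
   ["java and backend and junior and pizza 100", "- and - and - and - 200"])

def Spec_solution (infos : List String) (querys : List String) (out : List Int) : Prop := out = solution_alt infos querys
instance (infos : List String) (querys : List String) (out : List Int) : Decidable (Spec_solution infos querys out) := by unfold Spec_solution; infer_instance

-- ===== CLAIM (what is proved, stated in full; the proofs are below) =====
def Claim_equal_solution : Prop := ∀ (infos : List String) (querys : List String), Dom_solution infos querys → Pre_solution infos querys → Spec_solution infos querys (solution infos querys)

-- ===== LEMMAS AND PROOFS =====

-- the int score of one info line
def scoreOf (info : String) : Int :=
  (PySem.Int.ofStr? (PySem.List.pyGetD (PySem.Str.split₀ info) 4 "")).getD 0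

-- the 16 masked keys A generates for one info line, in A's generation order
def keysA (conds : List String) : List String :=
  (PySem.List.pyRange 0 5 1).flatMap (fun n =>
    (PySem.List.combinations (PySem.List.pyRange 0 4 1) n.toNat).map (fun idxs =>
      PySem.Str.join "_" (idxs.foldl (fun tmp idx => PySem.List.pySetD tmp idx "-")
        (PySem.List.slice conds none (some 4)))))

-- join of four tokens with "_", A's dictionary-key format
def kJ (m0 m1 m2 m3 : String) : String := PySem.Str.join "_" [m0, m1, m2, m3]

lemma keysA_eval (a0 a1 a2 a3 : String) (rest : List String) :
    keysA (a0 :: a1 :: a2 :: a3 :: rest) =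
      [kJ a0 a1 a2 a3,
       kJ "-" a1 a2 a3, kJ a0 "-" a2 a3, kJ a0 a1 "-" a3, kJ a0 a1 a2 "-",
       kJ "-" "-" a2 a3, kJ "-" a1 "-" a3, kJ "-" a1 a2 "-", kJ a0 "-" "-" a3,
       kJ a0 "-" a2 "-", kJ a0 a1 "-" "-",
       kJ "-" "-" "-" a3, kJ "-" "-" a2 "-", kJ "-" a1 "-" "-", kJ a0 "-" "-" "-",
       kJ "-" "-" "-" "-"] := by
  have h4 : PySem.List.slice (a0 :: a1 :: a2 :: a3 :: rest) none (some 4) = [a0, a1, a2, a3] := by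
    rw [PySem.List.slice_to] <;> first | rfl | decide
  rw [keysA, h4]
  rfl

lemma kJ_toList (m0 m1 m2 m3 : String) :
    (kJ m0 m1 m2 m3).toList = m0.toList ++ '_' :: (m1.toList ++ '_' :: (m2.toList ++ '_' :: m3.toList)) := by
  simp [kJ, PySem.Str.toList_join, PySem.Chars.join_cons_cons, PySem.Chars.join_singleton]

lemma sep_peel (x y u v : List Char) (hx : '_' ∉ x) (hy : '_' ∉ y)
    (h : x ++ '_' :: u = y ++ '_' :: v) : x = y ∧ u = v := by
  induction x generalizing y with
  | nil =>
    cases y with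
    | nil => simpa using h
    | cons d ys =>
      simp only [List.nil_append, List.cons_append, List.cons.injEq] at h
      exact absurd (h.1 ▸ (List.mem_cons_self : d ∈ d :: ys)) hy
  | cons c xs ih =>
    cases y with
    | nil =>
      simp only [List.cons_append, List.nil_append, List.cons.injEq] at h
      exact absurd (h.1 ▸ (List.mem_cons_self : c ∈ c :: xs)) hx
    | cons d ys =>
      simp only [List.cons_append, List.cons.injEq] at h
      have := ih (fun hm => hx (List.mem_cons_of_mem _ hm)) (y := ys)
        (fun hm => hy (List.mem_cons_of_mem _ hm)) h.2
      exact ⟨by rw [h.1, this.1], this.2⟩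

lemma kJ_eq_iff (m0 m1 m2 m3 q0 q1 q2 q3 : String)
    (h0 : '_' ∉ m0.toList) (h1 : '_' ∉ m1.toList) (h2 : '_' ∉ m2.toList) (h3 : '_' ∉ m3.toList) :
    kJ m0 m1 m2 m3 = kJ q0 q1 q2 q3 ↔ (m0 = q0 ∧ m1 = q1 ∧ m2 = q2 ∧ m3 = q3) := by
  constructor
  · intro h
    have h' : (kJ m0 m1 m2 m3).toList = (kJ q0 q1 q2 q3).toList := by rw [h]
    rw [kJ_toList, kJ_toList] at h'
    have hcount := congrArg (List.count '_') h'
    simp only [List.count_append, List.count_cons_self] at hcount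
    rw [List.count_eq_zero.mpr h0, List.count_eq_zero.mpr h1, List.count_eq_zero.mpr h2,
        List.count_eq_zero.mpr h3] at hcount
    have hq0 : '_' ∉ q0.toList := List.count_eq_zero.mp (by omega)
    have hq1 : '_' ∉ q1.toList := List.count_eq_zero.mp (by omega)
    have hq2 : '_' ∉ q2.toList := List.count_eq_zero.mp (by omega)
    have hq3 : '_' ∉ q3.toList := List.count_eq_zero.mp (by omega)
    obtain ⟨e0, h'⟩ := sep_peel _ _ _ _ h0 hq0 h'
    obtain ⟨e1, h'⟩ := sep_peel _ _ _ _ h1 hq1 h'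
    obtain ⟨e2, h'⟩ := sep_peel _ _ _ _ h2 hq2 h'
    exact ⟨String.toList_inj.mp e0, String.toList_inj.mp e1, String.toList_inj.mp e2,
      String.toList_inj.mp h'⟩
  · rintro ⟨rfl, rfl, rfl, rfl⟩; rfl

-- the combinatorial heart: A generates the query's key exactly once per matching info, never otherwise
set_option maxHeartbeats 2000000 in
lemma keysA_count (a0 a1 a2 a3 : String) (rest : List String) (q0 q1 q2 q3 : String)
    (h0 : '_' ∉ a0.toList ∧ a0 ≠ "-") (h1 : '_' ∉ a1.toList ∧ a1 ≠ "-")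
    (h2 : '_' ∉ a2.toList ∧ a2 ≠ "-") (h3 : '_' ∉ a3.toList ∧ a3 ≠ "-") :
    (keysA (a0 :: a1 :: a2 :: a3 :: rest)).count (kJ q0 q1 q2 q3) =
      if (q0 = "-" ∨ q0 = a0) ∧ (q1 = "-" ∨ q1 = a1) ∧ (q2 = "-" ∨ q2 = a2) ∧ (q3 = "-" ∨ q3 = a3)
      then 1 else 0 := by
  obtain ⟨h0l, h0r⟩ := h0
  obtain ⟨h1l, h1r⟩ := h1
  obtain ⟨h2l, h2r⟩ := h2
  obtain ⟨h3l, h3r⟩ := h3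
  have hd : '_' ∉ ("-" : String).toList := by decide
  rw [keysA_eval]
  simp only [List.count_cons, List.count_nil, beq_iff_eq,
    kJ_eq_iff _ _ _ _ _ _ _ _ h0l h1l h2l h3l,
    kJ_eq_iff _ _ _ _ _ _ _ _ hd h1l h2l h3l,
    kJ_eq_iff _ _ _ _ _ _ _ _ h0l hd h2l h3l,
    kJ_eq_iff _ _ _ _ _ _ _ _ h0l h1l hd h3l,
    kJ_eq_iff _ _ _ _ _ _ _ _ h0l h1l h2l hd,
    kJ_eq_iff _ _ _ _ _ _ _ _ hd hd h2l h3l,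
    kJ_eq_iff _ _ _ _ _ _ _ _ hd h1l hd h3l,
    kJ_eq_iff _ _ _ _ _ _ _ _ hd h1l h2l hd,
    kJ_eq_iff _ _ _ _ _ _ _ _ h0l hd hd h3l,
    kJ_eq_iff _ _ _ _ _ _ _ _ h0l hd h2l hd,
    kJ_eq_iff _ _ _ _ _ _ _ _ h0l h1l hd hd,
    kJ_eq_iff _ _ _ _ _ _ _ _ hd hd hd h3l,
    kJ_eq_iff _ _ _ _ _ _ _ _ hd hd h2l hd,
    kJ_eq_iff _ _ _ _ _ _ _ _ hd h1l hd hd,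
    kJ_eq_iff _ _ _ _ _ _ _ _ h0l hd hd hd,
    kJ_eq_iff _ _ _ _ _ _ _ _ hd hd hd hd]
  by_cases d0 : q0 = "-" <;> by_cases d1 : q1 = "-" <;> by_cases d2 : q2 = "-" <;> by_cases d3 : q3 = "-" <;>
    by_cases e0 : a0 = q0 <;> by_cases e1 : a1 = q1 <;> by_cases e2 : a2 = q2 <;> by_cases e3 : a3 = q3 <;>
    simp_all [eq_comm]

-- A's contains/append/insert branch is exactly Dict.modify
lemma step_eq (d : PySem.Dict String (List Int)) (k : String) (s : Int) :
    (if d.contains k then d.modify k [] (fun l => l ++ [s]) else d.insert k [s]) =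
      d.modify k [] (fun l => l ++ [s]) := by
  by_cases h : d.contains k
  · simp [h]
  · rw [if_neg h, PySem.Dict.modify.eq_1,
      PySem.Dict.getD_of_not_contains _ _ (by simpa using h)]
    rfl

lemma get?_mk_map (l : List (String × List Int)) (k : String) :
    (PySem.Dict.mk (l.map (fun p => (p.1, PySem.List.sorted p.2 (fun x => x) false)))).get? k =
      ((PySem.Dict.mk l).get? k).map (fun v => PySem.List.sorted v (fun x => x) false) := by
  induction l with
  | nil => rfl
  | cons p t ih =>
    rw [List.map_cons, PySem.Dict.get?_mk_cons, PySem.Dict.get?_mk_cons]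
    by_cases h : p.1 == k
    · simp [h]
    · simp only [h]; simpa using ih

lemma flatMap_ite_filter {α : Type} (l : List α) (m : α → Bool) (s : α → Int) :
    l.flatMap (fun i => if m i then [s i] else []) = (l.filter m).map s := by
  induction l with
  | nil => rfl
  | cons x t ih =>
    rcases h : m x <;> simp [h, ih]

-- proof-side names for A's dictionary before and after the value sort
def buildA (infos : List String) : PySem.Dict String (List Int) :=
  infos.foldl (fun info_dict info =>
    let conds := PySem.Str.split₀ info
    (PySem.List.pyRange 0 5 1).foldl (fun info_dict n =>
      let idx_list := PySem.List.combinations (PySem.List.pyRange 0 4 1) n.toNat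
      idx_list.foldl (fun info_dict idxs =>
        let tmp := idxs.foldl (fun tmp idx => PySem.List.pySetD tmp idx "-")
                     (PySem.List.slice conds none (some 4))
        let info_dict_key := PySem.Str.join "_" tmp
        let score := (PySem.Int.ofStr? (PySem.List.pyGetD conds 4 "")).getD 0
        if info_dict.contains info_dict_key then
          info_dict.modify info_dict_key [] (fun l => l ++ [score])
        else info_dict.insert info_dict_key [score]) info_dict) info_dict)
    PySem.Dict.empty

def dictA (infos : List String) : PySem.Dict String (List Int) :=
  PySem.Dict.mk ((buildA infos).items.map (fun p => (p.1, PySem.List.sorted p.2 (fun x => x) false)))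

-- the value A's dictionary holds at any key K: per info, one copy of its score per generated key = K
set_option maxHeartbeats 1000000 in
lemma build_getD (infos : List String) (K : String) :
    (buildA infos).getD K [] =
    infos.flatMap (fun info => List.replicate ((keysA (PySem.Str.split₀ info)).count K) (scoreOf info)) := by
  simp only [buildA, step_eq]
  have h1 : ∀ (d : PySem.Dict String (List Int)) (info : String),
      (PySem.List.pyRange 0 5 1).foldl (fun info_dict n =>
        (PySem.List.combinations (PySem.List.pyRange 0 4 1) n.toNat).foldl (fun info_dict idxs =>
          info_dict.modify (PySem.Str.join "_" ((idxs.foldl (fun tmp idx => PySem.List.pySetD tmp idx "-")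
                       (PySem.List.slice (PySem.Str.split₀ info) none (some 4))))) []
            (fun l => l ++ [(PySem.Int.ofStr? (PySem.List.pyGetD (PySem.Str.split₀ info) 4 "")).getD 0])) info_dict) d
      = ((keysA (PySem.Str.split₀ info)).map (fun k => (k, scoreOf info))).foldl
          (fun d p => d.modify p.1 [] (fun l => l ++ [p.2])) d := by
    intro d info
    rw [List.foldl_map, keysA, List.foldl_flatMap]
    simp only [List.foldl_map, scoreOf]
  have h2 : ∀ (c : List String) (s : Int),
      ((((c.map (fun k => (k, s)))).filter (fun p => p.1 == K)).map (fun p => p.2)) =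
        List.replicate (c.count K) s := by
    intro c s
    rw [List.filter_map, List.map_map]
    have : ((fun p => p.1 == K) ∘ (fun k => (k, s))) = (fun k => k == K) := rfl
    rw [this]
    have : ((fun p : String × Int => p.2) ∘ (fun k => (k, s))) = (fun _ => s) := rfl
    rw [this, List.map_const', List.count_eq_length_filter]
  simp only [h1]
  rw [← List.foldl_flatMap, PySem.Dict.getD_foldl_modify_append]
  simp only [PySem.Dict.getD_empty, List.nil_append, List.filter_flatMap, List.map_flatMap, h2]

lemma bisect_count (xs : List Int) (x : Int) (h : xs.Pairwise (· ≤ ·)) :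
    (PySem.List.len xs) - (PySem.List.bisectLeft xs x : Int) =
      (xs.countP (fun v => decide (x ≤ v)) : Int) := by
  obtain ⟨hle, hlt, hge⟩ := PySem.List.bisectLeft_spec xs x h
  set b := PySem.List.bisectLeft xs x with hb
  have hsplit : xs = xs.take b ++ xs.drop b := (List.take_append_drop b xs).symm
  have h1 : (xs.take b).countP (fun v => decide (x ≤ v)) = 0 := by
    rw [List.countP_eq_zero]
    intro v hv
    obtain ⟨j, hm, rfl⟩ := List.mem_take_iff_getElem.mp hv
    have := hlt j (by omega) (by omega)
    simpa using not_le.mpr this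
  have h2 : (xs.drop b).countP (fun v => decide (x ≤ v)) = (xs.drop b).length := by
    rw [List.countP_eq_length]
    intro v hv
    obtain ⟨j, hj, rfl⟩ := List.getElem_of_mem hv
    rw [List.getElem_drop]
    have hjl : j < xs.length - b := by simpa using hj
    exact decide_eq_true (hge (b + j) (by omega) (by omega))
  have hc : xs.countP (fun v => decide (x ≤ v)) = (xs.drop b).length := by
    conv_lhs => rw [hsplit]
    rw [List.countP_append, h1, h2, Nat.zero_add]
  rw [PySem.List.len_eq, hc, List.length_drop]
  omega

lemma list5 {l : List String} (h : 5 ≤ l.length) :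
    ∃ a0 a1 a2 a3 s r, l = a0 :: a1 :: a2 :: a3 :: s :: r := by
  rcases l with _ | ⟨a, _ | ⟨b, _ | ⟨c, _ | ⟨d, _ | ⟨e, r⟩⟩⟩⟩⟩ <;>
    simp only [List.length_nil, List.length_cons] at h <;> first | omega | exact ⟨a, b, c, d, e, r, rfl⟩

lemma build_val (infos : List String)
    (hinfo : ∀ info ∈ infos, 5 ≤ (PySem.Str.split₀ info).length ∧
      (∀ t ∈ List.take 4 (PySem.Str.split₀ info), '_' ∉ t.toList ∧ t ≠ "-") ∧
      (PySem.Int.ofStr? ((PySem.Str.split₀ info).getD 4 "")).isSome = true)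
    (q0 q1 q2 q3 : String) :
    (buildA infos).getD (kJ q0 q1 q2 q3) [] =
    (infos.filter (fun i => mtch q0 q1 q2 q3 i)).map scoreOf := by
  rw [build_getD, ← flatMap_ite_filter]
  refine List.flatMap_congr (fun info hi => ?_)
  obtain ⟨hl5, hattr, _⟩ := hinfo info hi
  obtain ⟨a0, a1, a2, a3, s, ir, hsp⟩ := list5 hl5
  rw [hsp]
  rw [hsp] at hattr
  have h0 := hattr a0 (by simp)
  have h1 := hattr a1 (by simp)
  have h2 := hattr a2 (by simp)
  have h3 := hattr a3 (by simp)
  rw [keysA_count a0 a1 a2 a3 _ q0 q1 q2 q3 h0 h1 h2 h3]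
  have hm : mtch q0 q1 q2 q3 info = true ↔
      ((q0 = "-" ∨ q0 = a0) ∧ (q1 = "-" ∨ q1 = a1) ∧ (q2 = "-" ∨ q2 = a2) ∧ (q3 = "-" ∨ q3 = a3)) := by
    simp [mtch, hsp]
  by_cases hmm : (q0 = "-" ∨ q0 = a0) ∧ (q1 = "-" ∨ q1 = a1) ∧ (q2 = "-" ∨ q2 = a2) ∧ (q3 = "-" ∨ q3 = a3)
  · rw [if_pos hmm, if_pos (hm.mpr hmm)]; rfl
  · rw [if_neg hmm, if_neg (fun hx => hmm (hm.mp hx))]; rfl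

lemma cnt_glue (o : Option (List Int)) (cut : Int) :
    (if (o.map (fun v => PySem.List.sorted v (fun x => x) false)).isSome = true then
       PySem.List.len ((o.map (fun v => PySem.List.sorted v (fun x => x) false)).getD []) -
         (PySem.List.bisectLeft ((o.map (fun v => PySem.List.sorted v (fun x => x) false)).getD []) cut : Int)
     else 0) = ((o.getD []).countP (fun v => decide (cut ≤ v)) : Int) := by
  cases o with
  | none => simp
  | some v =>
    simp only [Option.map_some, Option.isSome_some, if_pos, Option.getD_some]
    rw [bisect_count _ _ (by simpa using PySem.List.sorted_pairwise v (fun x => x))]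
    congr 1
    exact List.Perm.countP_eq _ (PySem.List.sorted_perm v _ _)

-- A's per-query answer, rephrased as a count over the unsorted dictionary value
lemma cntA_eq (infos : List String) (key : String) (cut : Int) :
    (if (dictA infos).contains key then
       PySem.List.len ((dictA infos).getD key []) -
         (PySem.List.bisectLeft ((dictA infos).getD key []) cut : Int)
     else 0) =
    (((buildA infos).getD key []).countP (fun v => decide (cut ≤ v)) : Int) := by
  rw [dictA, PySem.Dict.contains_eq_isSome_get?, PySem.Dict.getD_eq_get?_getD, get?_mk_map, cnt_glue,
    ← PySem.Dict.getD_eq_get?_getD]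

-- B's parsed-info list, as a map over the infos
def dataB (infos : List String) : List (List String × Int) :=
  infos.map (fun info => (PySem.List.slice (PySem.Str.split₀ info) none (some 4),
    (PySem.Int.ofStr? (PySem.List.pyGetD (PySem.Str.split₀ info) 4 "")).getD 0))

lemma dataB_eq (infos : List String) :
    infos.foldl (fun data info =>
      data ++ [(PySem.List.slice (PySem.Str.split₀ info) none (some 4),
                (PySem.Int.ofStr? (PySem.List.pyGetD (PySem.Str.split₀ info) 4 "")).getD 0)]) [] =
    dataB infos := by
  rw [PySem.List.foldl_append_singleton_eq_map, List.nil_append, dataB]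

-- B's inner loop is a count of the matching infos
lemma cntB_eq (infos : List String) (tq : List String) :
    (dataB infos).foldl (fun cnt p =>
      if matchesB tq p.1 &&
          ((PySem.Int.ofStr? (PySem.List.pyGetD tq 4 "")).getD 0 ≤ p.2)
      then cnt + 1 else cnt) 0 =
    (infos.countP (fun info => matchesB tq (PySem.List.slice (PySem.Str.split₀ info) none (some 4)) &&
      decide ((PySem.Int.ofStr? (PySem.List.pyGetD tq 4 "")).getD 0 ≤
        (PySem.Int.ofStr? (PySem.List.pyGetD (PySem.Str.split₀ info) 4 "")).getD 0)) : Int) := by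
  rw [dataB, List.foldl_map, PySem.List.foldl_if_add_one, Int.zero_add]

-- a well-formed query (4 condition tokens and an int cutoff): both sides count the matching infos
set_option maxHeartbeats 1000000 in
lemma perquery (infos : List String)
    (hinfo : ∀ info ∈ infos, 5 ≤ (PySem.Str.split₀ info).length ∧
      (∀ t ∈ List.take 4 (PySem.Str.split₀ info), '_' ∉ t.toList ∧ t ≠ "-") ∧
      (PySem.Int.ofStr? ((PySem.Str.split₀ info).getD 4 "")).isSome = true)
    (q0 q1 q2 q3 c : String) (tr : List String) :
    (if (dictA infos).contains
        (PySem.Str.join "_" (PySem.List.slice (q0::q1::q2::q3::c::tr) none (some 4))) then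
       PySem.List.len ((dictA infos).getD
           (PySem.Str.join "_" (PySem.List.slice (q0::q1::q2::q3::c::tr) none (some 4))) []) -
         (PySem.List.bisectLeft ((dictA infos).getD
             (PySem.Str.join "_" (PySem.List.slice (q0::q1::q2::q3::c::tr) none (some 4))) [])
           ((PySem.Int.ofStr? (PySem.List.pyGetD (q0::q1::q2::q3::c::tr) 4 "")).getD 0) : Int)
     else 0) =
    (dataB infos).foldl (fun cnt p =>
      if matchesB (q0::q1::q2::q3::c::tr) p.1 &&
          ((PySem.Int.ofStr? (PySem.List.pyGetD (q0::q1::q2::q3::c::tr) 4 "")).getD 0 ≤ p.2)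
      then cnt + 1 else cnt) 0 := by
  have hsl : PySem.List.slice (q0::q1::q2::q3::c::tr) none (some 4) = [q0, q1, q2, q3] := by
    rw [PySem.List.slice_to] <;> first | rfl | decide
  have hget : PySem.List.pyGetD (q0::q1::q2::q3::c::tr) (4 : Int) "" = c := by
    rw [PySem.List.pyGetD_ofNat']; rfl
  have hkJ : PySem.Str.join "_" [q0, q1, q2, q3] = kJ q0 q1 q2 q3 := rfl
  rw [cntB_eq, hsl, hget, hkJ, cntA_eq, build_val infos hinfo q0 q1 q2 q3]
  rw [List.countP_map, List.countP_filter]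
  refine congrArg (fun n : Nat => (n : Int)) (List.countP_congr (fun info hi => ?_))
  obtain ⟨hl5, hattr, _⟩ := hinfo info hi
  obtain ⟨a0, a1, a2, a3, s, ir, hsp⟩ := list5 hl5
  have hsl2 : PySem.List.slice (a0::a1::a2::a3::s::ir) none (some 4) = [a0, a1, a2, a3] := by
    rw [PySem.List.slice_to] <;> first | rfl | decide
  have hget2 : PySem.List.pyGetD (a0::a1::a2::a3::s::ir) (4 : Int) "" = s := by
    rw [PySem.List.pyGetD_ofNat']; rfl
  have h4t : decide ((4 : Int) ≤ PySem.List.len (q0::q1::q2::q3::c::tr)) = true := by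
    rw [decide_eq_true_eq, PySem.List.len_eq]
    simp only [List.length_cons]
    push_cast
    omega
  simp only [Function.comp, scoreOf, mtch, matchesB, hsp, hsl, hsl2, hget2, h4t,
    Bool.true_and]
  simp only [List.zip_cons_cons, List.zip_nil_right, List.all_cons, List.all_nil,
    List.getD_cons_zero, List.getD_cons_succ]
  simp only [Bool.and_eq_true, decide_eq_true_eq, Bool.or_eq_true, beq_iff_eq, Bool.and_true]
  exact and_comm

-- splitU facts: splitting the "_"-join of '_'-free tokens recovers the tokens
lemma splitU_free (x : List Char) (hx : '_' ∉ x) : splitU x = [x] := by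
  induction x with
  | nil => rfl
  | cons c t ih =>
    have hc : ¬ c = '_' := fun h => hx (h ▸ List.mem_cons_self)
    rw [splitU]
    simp only [ih (fun hm => hx (List.mem_cons_of_mem _ hm)), if_neg hc]
    rfl

lemma splitU_append (x : List Char) (hx : '_' ∉ x) (r : List Char) :
    splitU (x ++ '_' :: r) = x :: splitU r := by
  induction x with
  | nil => rw [List.nil_append, splitU]; simp
  | cons c t ih =>
    have hc : ¬ c = '_' := fun h => hx (h ▸ List.mem_cons_self)
    rw [List.cons_append, splitU]
    simp only [ih (fun hm => hx (List.mem_cons_of_mem _ hm)), if_neg hc]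
    rfl

lemma splitUS_kJ (m0 m1 m2 m3 : String) (h0 : '_' ∉ m0.toList) (h1 : '_' ∉ m1.toList)
    (h2 : '_' ∉ m2.toList) (h3 : '_' ∉ m3.toList) :
    splitUS (kJ m0 m1 m2 m3) = [m0, m1, m2, m3] := by
  have hm : ∀ m : String, String.ofList m.toList = m := fun m =>
    String.toList_inj.mp String.toList_ofList
  rw [splitUS, kJ_toList, splitU_append _ h0, splitU_append _ h1, splitU_append _ h2,
    splitU_free _ h3]
  simp [hm]

-- if the key is some masked variant of an info's attributes, the query key hits
lemma hit_of_mask (infos : List String) (info : String) (hi : info ∈ infos)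
    (a0 a1 a2 a3 s : String) (ir : List String)
    (hsp : PySem.Str.split₀ info = a0 :: a1 :: a2 :: a3 :: s :: ir)
    (h0 : '_' ∉ a0.toList) (h1 : '_' ∉ a1.toList) (h2 : '_' ∉ a2.toList) (h3 : '_' ∉ a3.toList)
    (m0 m1 m2 m3 : String)
    (hm0 : m0 = a0 ∨ m0 = "-") (hm1 : m1 = a1 ∨ m1 = "-")
    (hm2 : m2 = a2 ∨ m2 = "-") (hm3 : m3 = a3 ∨ m3 = "-") :
    keyHit infos (kJ m0 m1 m2 m3) := by
  have hd : '_' ∉ ("-" : String).toList := by decide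
  have hf0 : '_' ∉ m0.toList := by rcases hm0 with rfl | rfl <;> assumption
  have hf1 : '_' ∉ m1.toList := by rcases hm1 with rfl | rfl <;> assumption
  have hf2 : '_' ∉ m2.toList := by rcases hm2 with rfl | rfl <;> assumption
  have hf3 : '_' ∉ m3.toList := by rcases hm3 with rfl | rfl <;> assumption
  rw [keyHit, splitUS_kJ _ _ _ _ hf0 hf1 hf2 hf3]
  refine ⟨rfl, info, hi, ?_⟩
  simp only [mtch, hsp, List.getD_cons_zero, List.getD_cons_succ,
    Bool.and_eq_true, Bool.or_eq_true, beq_iff_eq]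
  exact ⟨Or.symm hm0, Or.symm hm1, Or.symm hm2, Or.symm hm3⟩

-- a query whose "_"-joined key hits no info: both sides yield 0
set_option maxHeartbeats 1000000 in
lemma perquery_miss (infos : List String)
    (hinfo : ∀ info ∈ infos, 5 ≤ (PySem.Str.split₀ info).length ∧
      (∀ t ∈ List.take 4 (PySem.Str.split₀ info), '_' ∉ t.toList ∧ t ≠ "-") ∧
      (PySem.Int.ofStr? ((PySem.Str.split₀ info).getD 4 "")).isSome = true)
    (tq : List String) (hmiss : ¬ keyHit infos (PySem.Str.join "_" (tq.take 4))) (cut : Int) :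
    (if (dictA infos).contains (PySem.Str.join "_" (PySem.List.slice tq none (some 4))) then
       PySem.List.len ((dictA infos).getD
           (PySem.Str.join "_" (PySem.List.slice tq none (some 4))) []) -
         (PySem.List.bisectLeft ((dictA infos).getD
             (PySem.Str.join "_" (PySem.List.slice tq none (some 4))) []) cut : Int)
     else 0) =
    (dataB infos).foldl (fun cnt p =>
      if matchesB tq p.1 &&
          ((PySem.Int.ofStr? (PySem.List.pyGetD tq 4 "")).getD 0 ≤ p.2)
      then cnt + 1 else cnt) 0 := by
  have hsl : PySem.List.slice tq none (some 4) = tq.take 4 := by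
    rw [PySem.List.slice_to tq (by decide)]
    rfl
  rw [cntB_eq, hsl, cntA_eq]
  have hempty : (buildA infos).getD (PySem.Str.join "_" (tq.take 4)) [] = [] := by
    rw [build_getD, List.flatMap_eq_nil_iff]
    intro info hi
    obtain ⟨hl5, hattr, _⟩ := hinfo info hi
    obtain ⟨a0, a1, a2, a3, sc, ir, hsp⟩ := list5 hl5
    rw [hsp] at hattr
    have h0 := hattr a0 (by simp)
    have h1 := hattr a1 (by simp)
    have h2 := hattr a2 (by simp)
    have h3 := hattr a3 (by simp)
    rw [hsp]
    have hcount : (keysA (a0 :: a1 :: a2 :: a3 :: sc :: ir)).count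
        (PySem.Str.join "_" (tq.take 4)) = 0 := by
      rw [List.count_eq_zero]
      intro hmem
      rw [keysA_eval] at hmem
      simp only [List.mem_cons, List.not_mem_nil, or_false] at hmem
      rcases hmem with h|h|h|h|h|h|h|h|h|h|h|h|h|h|h|h <;>
        (apply hmiss; rw [h];
         exact hit_of_mask infos info hi a0 a1 a2 a3 sc ir hsp h0.1 h1.1 h2.1 h3.1
           _ _ _ _ (by simp) (by simp) (by simp) (by simp))
    rw [hcount]
    rfl
  rw [hempty]
  simp only [List.countP_nil, Nat.cast_zero]
  symm
  rw [Int.natCast_eq_zero, List.countP_eq_zero]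
  intro info hi hcontra
  rw [Bool.and_eq_true] at hcontra
  obtain ⟨hmB, _⟩ := hcontra
  obtain ⟨hl5, hattr, _⟩ := hinfo info hi
  obtain ⟨a0, a1, a2, a3, sc, ir, hsp⟩ := list5 hl5
  rw [hsp] at hattr
  have h0 := hattr a0 (by simp)
  have h1 := hattr a1 (by simp)
  have h2 := hattr a2 (by simp)
  have h3 := hattr a3 (by simp)
  rw [matchesB, Bool.and_eq_true] at hmB
  obtain ⟨hlen4, hzip⟩ := hmB
  rw [decide_eq_true_eq, PySem.List.len_eq] at hlen4
  obtain ⟨t0, t1, t2, t3, tr, htq⟩ : ∃ t0 t1 t2 t3 tr, tq = t0 :: t1 :: t2 :: t3 :: tr := by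
    rcases tq with _ | ⟨x, _ | ⟨y, _ | ⟨z, _ | ⟨w, r⟩⟩⟩⟩ <;>
      simp only [List.length_nil, List.length_cons] at hlen4 <;>
      first | (exfalso; omega) | exact ⟨x, y, z, w, r, rfl⟩
  subst htq
  have hsl2 : PySem.List.slice (a0::a1::a2::a3::sc::ir) none (some 4) = [a0, a1, a2, a3] := by
    rw [PySem.List.slice_to] <;> first | rfl | decide
  have hslt : PySem.List.slice (t0::t1::t2::t3::tr) none (some 4) = [t0, t1, t2, t3] := by
    rw [PySem.List.slice_to] <;> first | rfl | decide
  rw [hsp, hslt, hsl2] at hzip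
  simp only [List.zip_cons_cons, List.zip_nil_right, List.all_cons, List.all_nil,
    Bool.and_eq_true, Bool.or_eq_true, beq_iff_eq, Bool.and_true] at hzip
  apply hmiss
  have hk : PySem.Str.join "_" ((t0::t1::t2::t3::tr).take 4) = kJ t0 t1 t2 t3 := rfl
  rw [hk]
  exact hit_of_mask infos info hi a0 a1 a2 a3 sc ir hsp h0.1 h1.1 h2.1 h3.1
    t0 t1 t2 t3 (Or.symm hzip.1) (Or.symm hzip.2.1) (Or.symm hzip.2.2.1) (Or.symm hzip.2.2.2)

-- ===== VERDICT (by name: the statement is the Claim_ definition above) =====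
theorem solution_spec : Claim_equal_solution := by
  intro infos querys _ hpre
  obtain ⟨hinfo, hq⟩ := hpre
  unfold Spec_solution solution solution_alt
  rw [dataB_eq]
  simp only [PySem.List.foldl_append_singleton_eq_map, List.nil_append]
  refine List.map_congr_left ?_
  intro query hquery
  rcases hq query hquery with ⟨hlen, hparse⟩ | hmiss
  · obtain ⟨q0, q1, q2, q3, c, tr, ht⟩ := list5 hlen
    rw [ht]
    exact perquery infos hinfo q0 q1 q2 q3 c tr
  · exact perquery_miss infos hinfo _ hmiss _
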